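-- pv_equiv track=rewrite | github.com/insigh/Leetcode | Python_utils/tt_bihsi_0.py | min_T
-- ===== SOURCE A (Python) =====
-- def min_T(A):
--     min_ = A[0]
--     max_ = A[-1]
--     size = len(A)
--     gaps1 = [(A[-1]-item) for item in A]
--     gaps0 = [(item - A[0]) for item in A]
--     gap = max_ - min_
--     for i in range(1,gap+1):
--         flag = True
--         for item in range(0,gap+1,i):
--             if item not in gaps1 or item not in gaps0:
--                 flag = False
--                 break
--         if flag:
--             return i
-- ===== SOURCE B (Python) =====
-- def min_T(A):
--     lo = A[0]
--     hi = A[-1]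
--     gap = hi - lo
--     common = set(hi - x for x in A) & set(x - lo for x in A)
--     for i in sorted(common):
--         if 1 <= i <= gap and sum(1 for c in common if 0 <= c <= gap and c % i == 0) == gap // i + 1:
--             return i
--     return None
-- ===== Notes on version B (the rewrite author's own statement) =====
-- stated objective: faster
-- what changed: B never walks multiples: a valid step must itself be a common gap, so B tests only the sorted intersection of the two gap sets (at most len(A) values), and validity of i is decided by COUNTING the common values in [0,gap] divisible by i and comparing with the closed-form number of multiples gap//i+1 -- counting plus arithmetic replaces A's enumeration of every multiple with list-membership scans.
import Mathlib
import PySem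

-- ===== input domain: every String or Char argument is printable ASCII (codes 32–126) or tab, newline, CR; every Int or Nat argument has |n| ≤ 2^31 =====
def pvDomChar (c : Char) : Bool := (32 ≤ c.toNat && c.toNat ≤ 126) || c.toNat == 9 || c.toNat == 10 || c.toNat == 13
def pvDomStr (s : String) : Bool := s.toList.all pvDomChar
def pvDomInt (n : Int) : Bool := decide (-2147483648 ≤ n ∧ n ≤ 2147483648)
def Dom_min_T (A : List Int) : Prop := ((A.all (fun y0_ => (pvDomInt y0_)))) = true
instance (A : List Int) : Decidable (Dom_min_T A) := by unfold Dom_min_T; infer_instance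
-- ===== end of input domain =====

-- B never walks multiples: it tests only the sorted common gap values as candidate steps, deciding
-- validity by counting the common values in [0,gap] divisible by the candidate and comparing with the
-- closed-form multiple count gap//i+1, instead of A's enumeration of every multiple with list scans
-- (objective: faster).

-- ===== PORT A =====
def min_T (A : List Int) : Option Int :=
  let min_ := PySem.List.pyGetD A 0 0
  let max_ := PySem.List.pyGetD A (-1) 0
  let _size := PySem.List.len A
  let gaps1 := A.map (fun item => PySem.List.pyGetD A (-1) 0 - item)
  let gaps0 := A.map (fun item => item - PySem.List.pyGetD A 0 0)
  let gap := max_ - min_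
  (PySem.List.pyRange 1 (gap + 1) 1).find? (fun i =>
    (PySem.List.pyRange 0 (gap + 1) i).all (fun item =>
      gaps1.contains item && gaps0.contains item))

-- ===== PORT B =====
def min_T_alt (A : List Int) : Option Int :=
  let lo := PySem.List.pyGetD A 0 0
  let hi := PySem.List.pyGetD A (-1) 0
  let gap := hi - lo
  let common := PySem.Set.inter (PySem.Set.ofList (A.map (fun x => hi - x)))
                                (PySem.Set.ofList (A.map (fun x => x - lo)))
  (PySem.List.sorted common (fun x => x)).find? (fun i =>
    (decide (1 ≤ i) && decide (i ≤ gap)) &&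
      decide ((common.countP (fun c =>
          (decide (0 ≤ c) && decide (c ≤ gap)) && decide (PySem.Int.mod c i = 0)) : Int)
        = PySem.Int.floordiv gap i + 1))

-- ===== PRECONDITION & SPEC =====
-- Pre_ excludes only the empty list, on which the Python A raises IndexError on the first element access.
def Pre_min_T (A : List Int) : Prop := A ≠ []
instance (A : List Int) : Decidable (Pre_min_T A) := by unfold Pre_min_T; infer_instance
def pvWitness_min_T : List Int := ([1, 3])
def Spec_min_T (A : List Int) (out : Option Int) : Prop := out = min_T_alt A
instance (A : List Int) (out : Option Int) : Decidable (Spec_min_T A out) := by unfold Spec_min_T; infer_instance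

-- ===== CLAIM (what is proved, stated in full; the proofs are below) =====
def Claim_equal_min_T : Prop := ∀ (A : List Int), Dom_min_T A → Pre_min_T A → Spec_min_T A (min_T A)

-- ===== LEMMAS AND PROOFS =====

lemma pairwise_lt_of_le_nodup {l : List Int} (h1 : l.Pairwise (· ≤ ·)) (h2 : l.Nodup) :
    l.Pairwise (· < ·) :=
  (h1.and h2).imp (fun hab => lt_of_le_of_ne hab.1 hab.2)

lemma find?_min_of_pairwise :
    ∀ {l : List Int} {p : Int → Bool} {a : Int}, l.Pairwise (· < ·) → l.find? p = some a →
      ∀ b ∈ l, p b = true → a ≤ b := by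
  intro l
  induction l with
  | nil => intro p a _ hf; simp at hf
  | cons x t ih =>
    intro p a hl hf b hb hpb
    rcases List.pairwise_cons.mp hl with ⟨hx, ht⟩
    cases hpx : p x with
    | true =>
      rw [List.find?_cons_of_pos hpx] at hf
      injection hf with h; subst h
      rcases List.mem_cons.mp hb with rfl | hbt
      · exact le_refl _
      · exact le_of_lt (hx b hbt)
    | false =>
      rw [List.find?_cons_of_neg (by simp [hpx])] at hf
      rcases List.mem_cons.mp hb with rfl | hbt
      · rw [hpb] at hpx; cases hpx
      · exact ih ht hf b hbt hpb

lemma find?_eq_some_of_pairwise :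
    ∀ {l : List Int} {p : Int → Bool} {a : Int}, l.Pairwise (· < ·) → a ∈ l → p a = true →
      (∀ b ∈ l, p b = true → a ≤ b) → l.find? p = some a := by
  intro l
  induction l with
  | nil => intro p a _ ha; cases ha
  | cons x t ih =>
    intro p a hl ha hpa hmin
    rcases List.pairwise_cons.mp hl with ⟨hx, ht⟩
    rcases List.mem_cons.mp ha with rfl | hat
    · exact List.find?_cons_of_pos hpa
    · have hpx : p x = false := by
        cases hpx : p x with
        | false => rfl
        | true =>
          have h1 := hmin x (by simp) hpx
          have h2 := hx a hat
          omega
      rw [List.find?_cons_of_neg (by simp [hpx])]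
      exact ih ht hat hpa (fun b hb hpb => hmin b (List.mem_cons_of_mem _ hb) hpb)

-- the first hit of two searches agree when both lists are strictly increasing and
-- membership-with-predicate describes the same set of integers
lemma find?_eq_find?_of_pairwise {l1 l2 : List Int} {p1 p2 : Int → Bool}
    (h1 : l1.Pairwise (· < ·)) (h2 : l2.Pairwise (· < ·))
    (h : ∀ x, (x ∈ l1 ∧ p1 x = true) ↔ (x ∈ l2 ∧ p2 x = true)) :
    l1.find? p1 = l2.find? p2 := by
  cases hf : l1.find? p1 with
  | none =>
    symm
    rw [List.find?_eq_none] at hf ⊢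
    intro x hx hpx
    obtain ⟨hm1, hp1⟩ := (h x).mpr ⟨hx, hpx⟩
    exact hf x hm1 hp1
  | some a =>
    obtain ⟨hm2, hp2⟩ := (h a).mp ⟨List.mem_of_find?_eq_some hf, List.find?_some hf⟩
    refine (find?_eq_some_of_pairwise h2 hm2 hp2 ?_).symm
    intro b hb hpb
    obtain ⟨hb1, hpb1⟩ := (h b).mpr ⟨hb, hpb⟩
    exact find?_min_of_pairwise h1 hf b hb1 hpb1

-- membership in B's common set is exactly A's pair of list-membership tests
lemma mem_common_iff (g1 g0 : List Int) (m : Int) :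
    m ∈ PySem.Set.inter (PySem.Set.ofList g1) (PySem.Set.ofList g0) ↔ m ∈ g1 ∧ m ∈ g0 := by
  rw [PySem.Set.mem_inter, PySem.Set.mem_ofList, PySem.Set.mem_ofList]

-- length of the multiples list 0, i, 2i, … ≤ gap
lemma length_multiples (gap i : Int) (hi : 0 < i) (hg : 0 ≤ gap) :
    ((PySem.List.pyRange 0 (gap + 1) i).length : Int) = PySem.Int.floordiv gap i + 1 := by
  rw [PySem.List.pyRange_of_pos _ _ hi, List.length_map, List.length_range,
      if_pos (by omega : (0:Int) < gap + 1), PySem.Int.floordiv_eq_ediv_of_pos hi]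
  have h1 : gap + 1 - 0 + i - 1 = gap + 1 * i := by ring
  rw [h1, Int.add_mul_ediv_right _ _ (by omega : i ≠ 0)]
  have h2 : 0 ≤ gap / i := Int.ediv_nonneg hg (by omega)
  omega

lemma nodup_multiples (gap i : Int) (hi : 0 < i) :
    (PySem.List.pyRange 0 (gap + 1) i).Nodup := by
  rw [PySem.List.pyRange_of_pos _ _ hi]
  refine List.Nodup.map ?_ List.nodup_range
  intro a b hab
  simp only at hab
  have : (a : Int) = b := by
    have := mul_left_cancel₀ (by omega : i ≠ 0) (by omega : i * (a : Int) = i * b)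
    exact this
  exact_mod_cast this

-- core bridge: for 1 ≤ i ≤ gap, "every multiple of i in [0,gap] lies in both gap lists" is the same
-- as "the count of common values in [0,gap] divisible by i equals gap//i + 1"
lemma count_bridge (g1 g0 : List Int) (gap i : Int) (h1 : 1 ≤ i) (h2 : i ≤ gap) :
    ((PySem.List.pyRange 0 (gap + 1) i).all (fun m => g1.contains m && g0.contains m) = true)
    ↔ (((PySem.Set.inter (PySem.Set.ofList g1) (PySem.Set.ofList g0)).countP (fun c =>
          (decide (0 ≤ c) && decide (c ≤ gap)) && decide (PySem.Int.mod c i = 0)) : Int)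
        = PySem.Int.floordiv gap i + 1) := by
  set C := PySem.Set.inter (PySem.Set.ofList g1) (PySem.Set.ofList g0) with hC
  set p : Int → Bool := fun c => (decide (0 ≤ c) && decide (c ≤ gap)) && decide (PySem.Int.mod c i = 0) with hp
  set M := PySem.List.pyRange 0 (gap + 1) i with hM
  have hCnd : C.Nodup := PySem.Set.nodup_inter _ _ (PySem.Set.nodup_ofList g1)
  have hEnd : (C.filter p).Nodup := hCnd.filter p
  have hMnd : M.Nodup := nodup_multiples gap i (by omega)
  have hEs : C.filter p ⊆ M := by
    intro c hc
    rw [List.mem_filter] at hc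
    obtain ⟨_, hpc⟩ := hc
    simp only [hp, Bool.and_eq_true, decide_eq_true_eq] at hpc
    obtain ⟨⟨hc0, hcg⟩, hcm⟩ := hpc
    exact (PySem.List.mem_pyRange_iff_of_pos (by omega) c).mpr
      ⟨hc0, by omega, by simpa using (PySem.Int.mod_eq_zero_iff_dvd c i).mp hcm⟩
  have hlenM : (M.length : Int) = PySem.Int.floordiv gap i + 1 :=
    length_multiples gap i (by omega) (by omega)
  rw [List.countP_eq_length_filter]
  constructor
  · intro hA
    have hMs : M ⊆ C.filter p := by
      intro m hm
      obtain ⟨hm0, hm1, hdvd⟩ := (PySem.List.mem_pyRange_iff_of_pos (by omega : 0 < i) m).mp hm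
      have := List.all_eq_true.mp hA m hm
      rw [Bool.and_eq_true, List.contains_eq_mem, List.contains_eq_mem,
          decide_eq_true_eq, decide_eq_true_eq] at this
      rw [List.mem_filter]
      refine ⟨(mem_common_iff g1 g0 m).mpr this, ?_⟩
      simp only [hp, Bool.and_eq_true, decide_eq_true_eq]
      exact ⟨⟨hm0, by omega⟩, (PySem.Int.mod_eq_zero_iff_dvd m i).mpr (by simpa using hdvd)⟩
    have hle1 := List.Subperm.length_le (List.subperm_of_subset hEnd hEs)
    have hle2 := List.Subperm.length_le (List.subperm_of_subset hMnd hMs)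
    have : (C.filter p).length = M.length := by omega
    rw [this, hlenM]
  · intro hcnt
    have hlen : M.length ≤ (C.filter p).length := by omega
    have hperm := List.Subperm.perm_of_length_le (List.subperm_of_subset hEnd hEs) hlen
    rw [List.all_eq_true]
    intro m hm
    have hmE : m ∈ C.filter p := hperm.mem_iff.mpr hm
    rw [List.mem_filter] at hmE
    have := (mem_common_iff g1 g0 m).mp hmE.1
    rw [Bool.and_eq_true, List.contains_eq_mem, List.contains_eq_mem,
        decide_eq_true_eq, decide_eq_true_eq]
    exact this

-- ===== VERDICT (by name: the statement is the Claim_ definition above) =====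
theorem min_T_spec : Claim_equal_min_T := by
  intro A _ _
  show min_T A = min_T_alt A
  simp only [min_T, min_T_alt]
  set lo := PySem.List.pyGetD A 0 0
  set hi := PySem.List.pyGetD A (-1) 0
  set g1 := A.map (fun x => hi - x) with hg1
  set g0 := A.map (fun x => x - lo) with hg0
  set gap := hi - lo
  set C := PySem.Set.inter (PySem.Set.ofList g1) (PySem.Set.ofList g0) with hC
  apply find?_eq_find?_of_pairwise
  · exact PySem.List.pairwise_lt_pyRange_one 1 (gap + 1)
  · apply pairwise_lt_of_le_nodup
    · simpa using PySem.List.sorted_pairwise C (fun x => x)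
    · exact ((PySem.List.sorted_perm C (fun x => x) false).nodup_iff).mpr
        (PySem.Set.nodup_inter _ _ (PySem.Set.nodup_ofList g1))
  · intro x
    constructor
    · rintro ⟨hx, hA⟩
      obtain ⟨hx1, hx2⟩ := PySem.List.mem_pyRange_one.mp hx
      have hbr := (count_bridge g1 g0 gap x hx1 (by omega)).mp hA
      have hxC : x ∈ C := by
        have hxM : x ∈ PySem.List.pyRange 0 (gap + 1) x :=
          (PySem.List.mem_pyRange_iff_of_pos (by omega) x).mpr ⟨by omega, by omega, by simp⟩
        have := List.all_eq_true.mp hA x hxM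
        rw [Bool.and_eq_true, List.contains_eq_mem, List.contains_eq_mem,
            decide_eq_true_eq, decide_eq_true_eq] at this
        exact (mem_common_iff g1 g0 x).mpr this
      refine ⟨(PySem.List.mem_sorted _ _ _ _).mpr hxC, ?_⟩
      simp only [Bool.and_eq_true, decide_eq_true_eq]
      exact ⟨⟨hx1, by omega⟩, hbr⟩
    · rintro ⟨hmem, hB⟩
      simp only [Bool.and_eq_true, decide_eq_true_eq] at hB
      obtain ⟨⟨hc1, hc2⟩, hcnt⟩ := hB
      exact ⟨PySem.List.mem_pyRange_one.mpr ⟨hc1, by omega⟩,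
        (count_bridge g1 g0 gap x hc1 hc2).mpr hcnt⟩
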